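-- pv_equiv track=rewrite | github.com/anatolyburtsev/advent-of-code | 2024/day3/main.py | filter_enables_muls2
-- ===== SOURCE A (Python) =====
-- from itertools import accumulate
-- from typing import List
--
-- def filter_enables_muls2(expressions: List[str]) -> List[str]:
--     def is_enabled(expr: str, current_state: bool) -> bool:
--         match expr:
--             case "do()":
--                 return True
--             case "don't()":
--                 return False
--             case _:
--                 return current_state
--
--     states = accumulate(
--         expressions, lambda current_value, expr: is_enabled(expr, current_value), initial=True
--     )
--
--     return [expr for (expr, state) in zip(expressions, states) if state and expr not in {"do()", "don't()"}]
-- ===== SOURCE B (Python) =====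
-- from typing import List
--
--
-- def _split_at_control(exprs):
--     """Return (block_before_first_control, control_token, suffix_after_it),
--     or (exprs, None, None) if exprs contains no control token."""
--     for i, e in enumerate(exprs):
--         if e == "do()" or e == "don't()":
--             return exprs[:i], e, exprs[i + 1:]
--     return exprs, None, None
--
--
-- def filter_enables_muls2(expressions: List[str]) -> List[str]:
--     # stage 1: cut the list into blocks at control tokens, tagging each block
--     # with the flag set by the control token that precedes it
--     segments = []
--     flag, rest = True, expressions
--     while True:
--         block, ctrl, rest = _split_at_control(rest)
--         segments.append((flag, block))
--         if ctrl is None: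
--             break
--         flag = ctrl == "do()"
--     # stage 2: keep the enabled blocks and flatten them
--     return [e for flag, block in segments if flag for e in block]
-- ===== Notes on version B (the rewrite author's own statement) =====
-- stated objective: alternative
-- what changed: Instead of A's scan producing a per-element enable-state sequence zipped with the list and filtered, B segments the list: it repeatedly splits at the next control token into tagged (flag, block) segments, then flattens only the enabled blocks.
import Mathlib
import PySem

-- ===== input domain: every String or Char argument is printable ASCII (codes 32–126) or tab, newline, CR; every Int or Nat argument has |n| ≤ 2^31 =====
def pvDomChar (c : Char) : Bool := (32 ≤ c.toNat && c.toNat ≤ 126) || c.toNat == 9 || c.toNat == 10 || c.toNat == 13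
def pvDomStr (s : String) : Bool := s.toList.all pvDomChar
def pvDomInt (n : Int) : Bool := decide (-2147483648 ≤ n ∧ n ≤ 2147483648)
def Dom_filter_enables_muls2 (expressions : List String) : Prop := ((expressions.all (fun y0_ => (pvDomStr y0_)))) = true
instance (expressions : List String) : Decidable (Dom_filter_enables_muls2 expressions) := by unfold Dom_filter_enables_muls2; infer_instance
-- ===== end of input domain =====

-- B replaces A's accumulate-state-sequence + zip/filter by a segmentation: split at control
-- tokens into flag-tagged blocks, then flatten the enabled blocks; objective: alternative.


-- ===== PORT A =====
-- inner helper is_enabled: match on the expression, else keep the current state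
def pvIsEnabled (expr : String) (currentState : Bool) : Bool :=
  if expr = "do()" then true
  else if expr = "don't()" then false
  else currentState

-- A: states = accumulate(expressions, …, initial=True)  (length n+1, state BEFORE each expr),
-- then a comprehension over zip(expressions, states) keeping expr when state ∧ expr ∉ {do(), don't()}
def filter_enables_muls2 (expressions : List String) : List String :=
  let states := expressions.scanl (fun currentValue expr => pvIsEnabled expr currentValue) true
  ((expressions.zip states).filter
    (fun p => p.2 && !(p.1 = "do()" || p.1 = "don't()"))).map (·.1)

-- ===== PORT B =====
-- _split_at_control: scan for the first control token; the enumerate-with-slices loop is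
-- ported as structural recursion building the prefix (exact: same block/control/suffix split)
def pvSplitAtControl : List String → List String × Option (String × List String)
  | [] => ([], none)
  | e :: rest =>
    if e = "do()" ∨ e = "don't()" then ([], some (e, rest))
    else
      let (pre, r) := pvSplitAtControl rest
      (e :: pre, r)

-- termination measure for the while-loop: the suffix after a control token is shorter
theorem pvSplitAtControl_lt : ∀ (es : List String) (c : String) (r : List String),
    (pvSplitAtControl es).2 = some (c, r) → r.length < es.length := by
  intro es
  induction es with
  | nil => intro c r h; simp [pvSplitAtControl] at h
  | cons e rest ih =>
    intro c r h
    by_cases hc : e = "do()" ∨ e = "don't()"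
    · simp [pvSplitAtControl, hc] at h
      simp [h.2.symm]
    · simp only [pvSplitAtControl, if_neg hc] at h
      have := ih c r h
      simp
      omega

-- the while-loop of stage 1: accumulate the tagged segments
def pvSegLoop (flag : Bool) (rest : List String) (segments : List (Bool × List String)) :
    List (Bool × List String) :=
  match h : pvSplitAtControl rest with
  | (_block, none) => segments ++ [(flag, _block)]
  | (_block, some (ctrl, rest')) =>
    pvSegLoop (ctrl = "do()") rest' (segments ++ [(flag, _block)])
termination_by rest.length
decreasing_by exact pvSplitAtControl_lt rest ctrl rest' (by rw [h])

-- B: stage 1 (segment) then stage 2 (flatten the enabled blocks)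
def filter_enables_muls2_alt (expressions : List String) : List String :=
  (pvSegLoop true expressions []).flatMap (fun p => if p.1 then p.2 else [])

-- ===== PRECONDITION & SPEC =====
def Spec_filter_enables_muls2 (expressions : List String) (out : List String) : Prop := out = filter_enables_muls2_alt expressions
instance (expressions : List String) (out : List String) : Decidable (Spec_filter_enables_muls2 expressions out) := by unfold Spec_filter_enables_muls2; infer_instance

-- ===== CLAIM (what is proved, stated in full; the proofs are below) =====
def Claim_equal_filter_enables_muls2 : Prop := ∀ (expressions : List String), Dom_filter_enables_muls2 expressions → Spec_filter_enables_muls2 expressions (filter_enables_muls2 expressions)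

-- ===== LEMMAS AND PROOFS =====
-- proof-side reference semantics: the enable-state machine
def pvStateGo (enabled : Bool) : List String → List String
  | [] => []
  | expr :: rest =>
    if expr = "do()" then pvStateGo true rest
    else if expr = "don't()" then pvStateGo false rest
    else if enabled then expr :: pvStateGo enabled rest
    else pvStateGo enabled rest

-- A's zip/scanl/filter equals the state machine
theorem pvA_eq_stateGo (b : Bool) (es : List String) :
    ((es.zip (es.scanl (fun cv e => pvIsEnabled e cv) b)).filter
      (fun p => p.2 && !(p.1 = "do()" || p.1 = "don't()"))).map (·.1)
      = pvStateGo b es := by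
  induction es generalizing b with
  | nil => rfl
  | cons e rest ih =>
    rw [List.scanl_cons, List.zip_cons_cons, List.filter_cons]
    by_cases h1 : e = "do()"
    · simpa [pvStateGo, h1, pvIsEnabled] using ih true
    · by_cases h2 : e = "don't()"
      · simpa [pvStateGo, h1, h2, pvIsEnabled] using ih false
      · cases b with
        | false => simpa [pvStateGo, h1, h2, pvIsEnabled] using ih false
        | true => simpa [pvStateGo, h1, h2, pvIsEnabled] using ih true

-- the state machine, read off a split: emit the prefix block when enabled, then continue
theorem pvStateGo_split (b : Bool) (es : List String) :
    pvStateGo b es = (if b then (pvSplitAtControl es).1 else []) ++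
      (match (pvSplitAtControl es).2 with
       | none => []
       | some (c, r) => pvStateGo (c = "do()") r) := by
  induction es generalizing b with
  | nil => cases b <;> simp [pvStateGo, pvSplitAtControl]
  | cons e rest ih =>
    by_cases hc : e = "do()" ∨ e = "don't()"
    · rcases hc with h | h
      · subst h; simp [pvStateGo, pvSplitAtControl]
      · subst h
        have : ¬ ("don't()" = "do()") := by decide
        simp [pvStateGo, pvSplitAtControl, this]
    · have h1 : ¬ e = "do()" := fun h => hc (Or.inl h)
      have h2 : ¬ e = "don't()" := fun h => hc (Or.inr h)
      obtain ⟨pre, r, hpr⟩ : ∃ pre r, pvSplitAtControl rest = (pre, r) := ⟨_, _, rfl⟩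
      have hsplit : pvSplitAtControl (e :: rest) = (e :: pre, r) := by
        simp [pvSplitAtControl, hc, hpr]
      cases b with
      | true => simp [pvStateGo, h1, h2, hsplit, ih true, hpr]
      | false => simp [pvStateGo, h1, h2, hsplit, ih false, hpr]

-- the segment loop flattened equals the state machine
theorem pvSegLoop_flat (flag : Bool) (rest : List String) (acc : List (Bool × List String)) :
    (pvSegLoop flag rest acc).flatMap (fun p => if p.1 then p.2 else [])
      = acc.flatMap (fun p => if p.1 then p.2 else []) ++ pvStateGo flag rest := by
  induction flag, rest, acc using pvSegLoop.induct with
  | case1 flag rest acc block h =>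
    rw [pvSegLoop, h]
    have := pvStateGo_split flag rest
    rw [h] at this
    simp [this]
  | case2 flag rest acc block ctrl rest' h ih =>
    rw [pvSegLoop, h]
    have := pvStateGo_split flag rest
    rw [h] at this
    simp [ih, this]

-- ===== VERDICT (by name: the statement is the Claim_ definition above) =====
theorem filter_enables_muls2_spec : Claim_equal_filter_enables_muls2 := by
  intro es _
  unfold Spec_filter_enables_muls2 filter_enables_muls2 filter_enables_muls2_alt
  rw [pvSegLoop_flat]
  simpa using pvA_eq_stateGo true es
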